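-- pv_equiv track=rewrite | github.com/NCBI-Hackathons/RNA-Seq-in-the-Cloud | Splice/ParseGTFFunctions.py | construct_splice_structures
-- ===== SOURCE A (Python) =====
-- from collections import defaultdict, OrderedDict
--
-- def construct_splice_structures(tx_dict):
--     """
--     Parse `tx_dict` dictionary of transcripts to generate a set of unique
--     splice structures for each chrom/strand and a dictionary of
--     splice_structure : tx_info.
--     """
--     all_splice_structures = defaultdict(set)
--     splice_struct_dict = defaultdict(list)
--     for tx_info, exons in tx_dict.items():
--         [chrom, strand, gene_id, tx_id] = tx_info
--         exons.sort()
--         splice_structure = []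
--         i = 0
--         while (i + 1) < len(exons):
--             introns = (exons[i][1] + 1, exons[i+1][0] - 1)
--             splice_structure.append(introns)
--             i = i + 1
--         splice_structure = tuple(splice_structure)
--         all_splice_structures[(chrom, strand)].add(splice_structure)
--         if (chrom, strand) not in splice_struct_dict:
--             splice_struct_dict[(chrom, strand)] = defaultdict(list)
--         splice_struct_dict[(chrom, strand)][splice_structure].append(tx_info[2:])
--     return all_splice_structures, splice_struct_dict
-- ===== SOURCE B (Python) =====
-- from collections import defaultdict
--
-- def construct_splice_structures(tx_dict):
--     """
--     Parse `tx_dict` dictionary of transcripts to generate a set of unique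
--     splice structures for each chrom/strand and a dictionary of
--     splice_structure : tx_info.
--     """
--     # Phase 1: one flat dict keyed by the composite ((chrom, strand), structure),
--     # accumulating each transcript's (gene_id, tx_id) info under its composite key.
--     flat = {}
--     for tx_info, exons in tx_dict.items():
--         chrom, strand, gene_id, tx_id = tx_info
--         exons.sort()
--         structure = tuple((a[1] + 1, b[0] - 1) for a, b in zip(exons, exons[1:]))
--         k = ((chrom, strand), structure)
--         flat[k] = flat.get(k, []) + [tx_info[2:]]
--     # Phase 2: assemble the two nested result structures from the flat index,
--     # one step per DISTINCT (chrom/strand, structure) pair.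
--     all_splice_structures = defaultdict(set)
--     splice_struct_dict = defaultdict(list)
--     for (key, structure), infos in flat.items():
--         all_splice_structures[key].add(structure)
--         if key not in splice_struct_dict:
--             splice_struct_dict[key] = defaultdict(list)
--         splice_struct_dict[key][structure] = infos
--     return all_splice_structures, splice_struct_dict
-- ===== Notes on version B (the rewrite author's own statement) =====
-- stated objective: alternative
-- what changed: B replaces A's incremental nested defaultdict maintenance with a two-phase pipeline over a different data structure: phase 1 builds one flat dict keyed by the composite ((chrom,strand), splice_structure) accumulating tx infos (introns via zip of adjacent sorted exons instead of A's index-based while loop), and phase 2 assembles both nested result structures in a single pass over the deduplicated flat entries, one step per distinct pair instead of per transcript.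
import Mathlib
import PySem

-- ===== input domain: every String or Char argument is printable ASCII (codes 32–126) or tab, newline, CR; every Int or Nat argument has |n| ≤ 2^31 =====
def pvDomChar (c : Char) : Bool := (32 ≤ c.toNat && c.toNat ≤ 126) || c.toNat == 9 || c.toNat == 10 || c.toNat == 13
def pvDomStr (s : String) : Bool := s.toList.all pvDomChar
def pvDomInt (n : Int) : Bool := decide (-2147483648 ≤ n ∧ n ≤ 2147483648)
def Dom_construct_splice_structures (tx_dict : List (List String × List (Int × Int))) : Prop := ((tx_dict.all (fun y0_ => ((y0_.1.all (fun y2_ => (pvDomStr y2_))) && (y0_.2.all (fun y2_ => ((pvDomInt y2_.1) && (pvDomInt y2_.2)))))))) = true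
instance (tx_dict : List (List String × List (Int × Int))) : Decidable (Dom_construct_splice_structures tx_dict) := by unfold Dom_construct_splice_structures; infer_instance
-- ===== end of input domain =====

-- B replaces A's per-transcript maintenance of the nested result dicts with a two-phase pipeline:
-- a flat dict keyed by the composite ((chrom,strand), splice_structure), then one assembly pass
-- over its distinct entries (alternative decomposition, same cost).
-- A sorts each exon list in place (mutation); equivalence here is about the RETURN value (B sorts in place too).

-- ===== PORT A =====
-- A's while loop: i from 0 while i+1 < len(exons), appending (exons[i][1]+1, exons[i+1][0]-1)
def pvAIntrons (exons : List (Int × Int)) : List (Int × Int) :=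
  (PySem.List.pyRange 0 ((exons.length : Int) - 1) 1).foldl
    (fun acc i =>
      acc ++ [((PySem.List.pyGetD exons i (0, 0)).2 + 1,
               (PySem.List.pyGetD exons (i + 1) (0, 0)).1 - 1)]) []

def pvAStep
    (st : PySem.Dict (List String) (PySem.Set (List (Int × Int))) ×
          PySem.Dict (List String) (PySem.Dict (List (Int × Int)) (List (List String))))
    (p : List String × List (Int × Int)) :
    PySem.Dict (List String) (PySem.Set (List (Int × Int))) ×
    PySem.Dict (List String) (PySem.Dict (List (Int × Int)) (List (List String))) :=
  match p.1 with
  | [chrom, strand, gene_id, tx_id] =>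
      let exons := PySem.List.sorted2 p.2 (fun x => x.1) (fun x => x.2) false
      let splice_structure := pvAIntrons exons
      let all := st.1.insert [chrom, strand]
        (PySem.Set.add (st.1.getD [chrom, strand] PySem.Set.empty) splice_structure)
      let sd := if st.2.contains [chrom, strand] then st.2
                else st.2.insert [chrom, strand] PySem.Dict.empty
      let inner := sd.getD [chrom, strand] PySem.Dict.empty
      (all, sd.insert [chrom, strand]
        (inner.insert splice_structure
          (inner.getD splice_structure [] ++ [[gene_id, tx_id]])))
  | _ => st  -- Python raises ValueError on unpacking; excluded by Pre_

def construct_splice_structures (tx_dict : List (List String × List (Int × Int))) : (List (List String × List (List (Int × Int)))) × (List (List String × List (List (Int × Int) × List (List String)))) :=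
  let st := tx_dict.foldl pvAStep (PySem.Dict.empty, PySem.Dict.empty)
  (st.1.items, st.2.items.map (fun q => (q.1, q.2.items)))

-- ===== PORT B =====
-- phase 1: flat[k] = flat.get(k, []) + [tx_info[2:]] with k = ((chrom,strand), structure)
def pvBFlatStep
    (flat : PySem.Dict (List String × List (Int × Int)) (List (List String)))
    (p : List String × List (Int × Int)) :
    PySem.Dict (List String × List (Int × Int)) (List (List String)) :=
  match p.1 with
  | [chrom, strand, gene_id, tx_id] =>
      let exons := PySem.List.sorted2 p.2 (fun x => x.1) (fun x => x.2) false
      let struct := (exons.zip exons.tail).map (fun q => (q.1.2 + 1, q.2.1 - 1))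
      let k := ([chrom, strand], struct)
      flat.insert k (flat.getD k [] ++ [[gene_id, tx_id]])
  | _ => flat  -- Python raises ValueError on unpacking; excluded by Pre_

-- phase 2 body: one step per distinct ((chrom,strand), structure) entry of flat
def pvBAssemble
    (st : PySem.Dict (List String) (PySem.Set (List (Int × Int))) ×
          PySem.Dict (List String) (PySem.Dict (List (Int × Int)) (List (List String))))
    (e : (List String × List (Int × Int)) × List (List String)) :
    PySem.Dict (List String) (PySem.Set (List (Int × Int))) ×
    PySem.Dict (List String) (PySem.Dict (List (Int × Int)) (List (List String))) :=
  let key := e.1.1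
  let struct := e.1.2
  let all := st.1.insert key (PySem.Set.add (st.1.getD key PySem.Set.empty) struct)
  let sd := if st.2.contains key then st.2 else st.2.insert key PySem.Dict.empty
  (all, sd.insert key ((sd.getD key PySem.Dict.empty).insert struct e.2))

def construct_splice_structures_alt (tx_dict : List (List String × List (Int × Int))) : (List (List String × List (List (Int × Int)))) × (List (List String × List (List (Int × Int) × List (List String)))) :=
  let flat := tx_dict.foldl pvBFlatStep PySem.Dict.empty
  let st := flat.items.foldl pvBAssemble (PySem.Dict.empty, PySem.Dict.empty)
  (st.1.items, st.2.items.map (fun q => (q.1, q.2.items)))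

-- ===== PRECONDITION & SPEC =====
-- Pre_: every transcript key has exactly 4 fields; A's '[chrom, strand, gene_id, tx_id] = tx_info'
-- raises ValueError otherwise, so A returns exactly on Pre_.
def Pre_construct_splice_structures (tx_dict : List (List String × List (Int × Int))) : Prop :=
  ∀ p ∈ tx_dict, p.1.length = 4
instance (tx_dict : List (List String × List (Int × Int))) : Decidable (Pre_construct_splice_structures tx_dict) := by unfold Pre_construct_splice_structures; infer_instance
def pvWitness_construct_splice_structures : (List (List String × List (Int × Int))) :=
  [(["chr1", "+", "g1", "t1"], [(30, 40), (10, 20)])]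

def Spec_construct_splice_structures (tx_dict : List (List String × List (Int × Int))) (out : (List (List String × List (List (Int × Int)))) × (List (List String × List (List (Int × Int) × List (List String))))) : Prop := out = construct_splice_structures_alt tx_dict
instance (tx_dict : List (List String × List (Int × Int))) (out : (List (List String × List (List (Int × Int)))) × (List (List String × List (List (Int × Int) × List (List String))))) : Decidable (Spec_construct_splice_structures tx_dict out) := by
  unfold Spec_construct_splice_structures
  -- built by hand: the fully nested product exceeds instance-search's size limit
  have h2 : DecidableEq (List (List (Int × Int) × List (List String))) := inferInstance
  have h3 : DecidableEq (List (List String × List (List (Int × Int) × List (List String)))) :=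
    @instDecidableEqList _ (@instDecidableEqProd _ _ inferInstance h2)
  exact @instDecidableEqProd _ _ inferInstance h3 _ _

-- ===== CLAIM (what is proved, stated in full; the proofs are below) =====
def Claim_equal_construct_splice_structures : Prop := ∀ (tx_dict : List (List String × List (Int × Int))), Dom_construct_splice_structures tx_dict → Pre_construct_splice_structures tx_dict → Spec_construct_splice_structures tx_dict (construct_splice_structures tx_dict)

-- ===== LEMMAS AND PROOFS =====

-- the record a len-4 transcript contributes: (((chrom,strand), structure), gene/tx info)
def pvRec (p : List String × List (Int × Int)) :
    List String × List (Int × Int) :=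
  match p.1 with
  | [c, s, _, _] =>
      let exons := PySem.List.sorted2 p.2 (fun x => x.1) (fun x => x.2) false
      ([c, s], (exons.zip exons.tail).map (fun q => (q.1.2 + 1, q.2.1 - 1)))
  | _ => (p.1, [])

def pvVal (p : List String × List (Int × Int)) : List String :=
  match p.1 with
  | [_, _, g, t] => [g, t]
  | _ => []

-- A's step, rephrased on the record (proof-side helper)
def pvStepA
    (st : PySem.Dict (List String) (PySem.Set (List (Int × Int))) ×
          PySem.Dict (List String) (PySem.Dict (List (Int × Int)) (List (List String))))
    (r : (List String × List (Int × Int)) × List String) :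
    PySem.Dict (List String) (PySem.Set (List (Int × Int))) ×
    PySem.Dict (List String) (PySem.Dict (List (Int × Int)) (List (List String))) :=
  let key := r.1.1
  let ss := r.1.2
  let all := st.1.insert key (PySem.Set.add (st.1.getD key PySem.Set.empty) ss)
  let sd := if st.2.contains key then st.2 else st.2.insert key PySem.Dict.empty
  let inner := sd.getD key PySem.Dict.empty
  (all, sd.insert key (inner.insert ss (inner.getD ss [] ++ [r.2])))

-- B's flat step, rephrased on the record
def pvStepF
    (flat : PySem.Dict (List String × List (Int × Int)) (List (List String)))
    (r : (List String × List (Int × Int)) × List String) :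
    PySem.Dict (List String × List (Int × Int)) (List (List String)) :=
  flat.insert r.1 (flat.getD r.1 [] ++ [r.2])

-- a dict whose items are a map over a list (closed form of all dicts appearing here)
def pvMk {α κ ν : Type} [BEq κ] (l : List α) (k : α → κ) (v : α → ν) : PySem.Dict κ ν :=
  ⟨l.map (fun a => (k a, v a))⟩

-- closed form of the assembled pair of result dicts, as a function of the flat item list g
def pvFinalG (g : List ((List String × List (Int × Int)) × List (List String))) :
    PySem.Dict (List String) (PySem.Set (List (Int × Int))) ×
    PySem.Dict (List String) (PySem.Dict (List (Int × Int)) (List (List String))) :=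
  let cs := PySem.List.dedup (g.map (fun e => e.1.1))
  (pvMk cs id (fun c => (g.filter (fun e => e.1.1 == c)).map (fun e => e.1.2)),
   pvMk cs id (fun c => pvMk (g.filter (fun e => e.1.1 == c)) (fun e => e.1.2) (fun e => e.2)))

theorem pvMk_congr {α κ ν : Type} [BEq κ] (l : List α) (k : α → κ) (v₁ v₂ : α → ν)
    (h : ∀ a ∈ l, v₁ a = v₂ a) : pvMk l k v₁ = pvMk l k v₂ := by
  unfold pvMk
  exact congrArg _ (List.map_congr_left (fun a ha => by rw [h a ha]))

theorem pvMk_contains {α κ ν : Type} [BEq κ] (l : List α) (k : α → κ) (v : α → ν) (x : κ) :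
    (pvMk l k v).contains x = l.any (fun a => k a == x) := by
  simp [pvMk, PySem.Dict.contains, List.any_map, Function.comp_def]

theorem pvMk_getD_of_forall_ne {α κ ν : Type} [BEq κ] [LawfulBEq κ]
    (l : List α) (k : α → κ) (v : α → ν) (x : κ) (d : ν)
    (h : ∀ a ∈ l, k a ≠ x) : (pvMk l k v).getD x d = d := by
  apply PySem.Dict.getD_of_not_contains
  rw [pvMk_contains]
  simp only [List.any_eq_false, beq_iff_eq]
  exact h

theorem pvMk_keys {α κ ν : Type} [BEq κ] (l : List α) (k : α → κ) (v : α → ν) :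
    (pvMk l k v).keys = l.map k := by
  simp [pvMk, PySem.Dict.keys, List.map_map, Function.comp_def]

theorem pvMk_getD_of_mem {α κ ν : Type} [BEq κ] [LawfulBEq κ]
    (l : List α) (k : α → κ) (v : α → ν) (a₀ : α) (d : ν)
    (ha : a₀ ∈ l) (hnd : (l.map k).Nodup) : (pvMk l k v).getD (k a₀) d = v a₀ := by
  apply PySem.Dict.getD_of_mem_items
  · exact List.mem_map_of_mem ha
  · rw [pvMk_keys]; exact hnd

theorem pvMk_insert_of_mem {α κ ν : Type} [BEq κ] [LawfulBEq κ] [DecidableEq κ]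
    (l : List α) (k : α → κ) (v : α → ν) (x : κ) (w : ν)
    (h : ∃ a ∈ l, k a = x) :
    (pvMk l k v).insert x w = pvMk l k (fun a => if k a = x then w else v a) := by
  have hc : (pvMk l k v).contains x = true := by
    rw [pvMk_contains]
    obtain ⟨a, ha, hk⟩ := h
    exact List.any_eq_true.mpr ⟨a, ha, by simp [hk]⟩
  unfold PySem.Dict.insert
  rw [if_pos hc]
  unfold pvMk
  apply congrArg
  rw [List.map_map]
  apply List.map_congr_left
  intro a _
  by_cases hk : k a = x <;> simp [hk]

theorem pvMk_insert_fresh {α κ ν : Type} [BEq κ] [LawfulBEq κ]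
    (l : List α) (k : α → κ) (v : α → ν) (x : κ) (w : ν)
    (h : ∀ a ∈ l, k a ≠ x) :
    (pvMk l k v).insert x w = ⟨(l.map (fun a => (k a, v a))) ++ [(x, w)]⟩ := by
  have hc : (pvMk l k v).contains x = false := by
    rw [pvMk_contains]
    simp only [List.any_eq_false, beq_iff_eq]
    exact h
  unfold PySem.Dict.insert
  rw [hc]
  simp [pvMk]

theorem pvSet_ofList_append {α : Type} [BEq α] (l : List α) (x : α) :
    PySem.Set.ofList (l ++ [x]) = PySem.Set.add (PySem.Set.ofList l) x := by
  rw [PySem.Set.ofList_eq_foldl, PySem.Set.ofList_eq_foldl, List.foldl_append,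
      List.foldl_cons, List.foldl_nil]

-- A's index-loop over range(len-1) builds the same intron list as B's zip over adjacent pairs.
theorem pvAIntrons_eq_zip (l : List (Int × Int)) :
    pvAIntrons l = (l.zip l.tail).map (fun q => (q.1.2 + 1, q.2.1 - 1)) := by
  unfold pvAIntrons
  rw [PySem.List.foldl_append_singleton_eq_map
    (f := fun i => ((PySem.List.pyGetD l i (0,0)).2 + 1, (PySem.List.pyGetD l (i+1) (0,0)).1 - 1))]
  rw [PySem.List.pyRange_one, List.map_map, List.nil_append]
  apply List.ext_getElem
  · simp
  · intro i h1 h2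
    simp only [List.getElem_map, Function.comp_apply, List.getElem_range, List.getElem_zip, List.getElem_tail]
    have h2' : i + 1 < l.length := by simp at h2; omega
    rw [PySem.List.pyGetD_eq_getElem _ _ (by omega) (by omega),
        PySem.List.pyGetD_eq_getElem _ _ (by omega) (by omega)]
    simp

theorem pvMk_eta (g : List ((List String × List (Int × Int)) × List (List String))) :
    (⟨g⟩ : PySem.Dict (List String × List (Int × Int)) (List (List String)))
      = pvMk g (fun a => a.1) (fun a => a.2) := by
  unfold pvMk; simp

theorem pvMk_map {α β κ ν : Type} [BEq κ] (l : List α) (F : α → β) (k : β → κ) (v : β → ν) :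
    pvMk (l.map F) k v = pvMk l (fun a => k (F a)) (fun a => v (F a)) := by
  unfold pvMk; rw [List.map_map]; rfl

theorem pvSsNotMem (g : List ((List String × List (Int × Int)) × List (List String)))
    (c : List String) (ss : List (Int × Int))
    (hf : (c, ss) ∉ g.map (fun x => x.1)) :
    ss ∉ (g.filter (fun x => x.1.1 == c)).map (fun x => x.1.2) := by
  intro hm
  obtain ⟨a, ha, ha2⟩ := List.mem_map.mp hm
  obtain ⟨hag, hac⟩ := List.mem_filter.mp ha
  have h1 : a.1.1 = c := by simpa using hac
  exact hf (List.mem_map.mpr ⟨a, hag, Prod.ext h1 ha2⟩)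

theorem pvFilterNil (g : List ((List String × List (Int × Int)) × List (List String)))
    (c : List String) (hc : c ∉ g.map (fun x => x.1.1)) :
    g.filter (fun x => x.1.1 == c) = [] := by
  rw [List.filter_eq_nil_iff]
  intro a ha h
  exact hc (List.mem_map.mpr ⟨a, ha, by simpa using h⟩)

theorem pvInnerNodup (g : List ((List String × List (Int × Int)) × List (List String)))
    (c : List String) (hnd : (g.map (fun x => x.1)).Nodup) :
    ((g.filter (fun x => x.1.1 == c)).map (fun x => x.1.2)).Nodup := by
  have h1 : ((g.filter (fun x => x.1.1 == c)).map (fun x => x.1)).Nodup :=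
    ((List.filter_sublist (p := fun x => x.1.1 == c) (l := g)).map (fun x => x.1)).nodup hnd
  have h2 : (g.filter (fun x => x.1.1 == c)).map (fun x => x.1.2)
      = ((g.filter (fun x => x.1.1 == c)).map (fun x => x.1)).map (fun p => p.2) := by
    rw [List.map_map]; rfl
  rw [h2]
  apply List.Nodup.map_on _ h1
  intro x hx y hy hxy
  obtain ⟨a, ha, ha1⟩ := List.mem_map.mp hx
  obtain ⟨b, hb, hb1⟩ := List.mem_map.mp hy
  have hax : x.1 = c := by
    have := (List.mem_filter.mp ha).2; rw [← ha1]; simpa using this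
  have hbx : y.1 = c := by
    have := (List.mem_filter.mp hb).2; rw [← hb1]; simpa using this
  exact Prod.ext (hax.trans hbx.symm) hxy

theorem pvFinalG_fresh
    (g : List ((List String × List (Int × Int)) × List (List String)))
    (e : (List String × List (Int × Int)) × List (List String))
    (_hnd : (g.map (fun e => e.1)).Nodup) (hf : e.1 ∉ g.map (fun e => e.1)) :
    pvBAssemble (pvFinalG g) e = pvFinalG (g ++ [e]) := by
  obtain ⟨⟨c, ss⟩, v⟩ := e
  have hssA : ss ∉ (g.filter (fun x => x.1.1 == c)).map (fun x => x.1.2) := pvSsNotMem g c ss hf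
  have hcsnd : (PySem.List.dedup (g.map (fun x => x.1.1))).Nodup := PySem.List.nodup_dedup _
  have hcs' : PySem.List.dedup ((g ++ [((c, ss), v)]).map (fun x => x.1.1))
      = PySem.Set.add (PySem.List.dedup (g.map (fun x => x.1.1))) c := by
    rw [List.map_append]
    simp only [List.map_cons, List.map_nil, PySem.List.dedup_eq_ofList]
    exact pvSet_ofList_append _ _
  have hFA : ∀ c' : List String, (g ++ [((c, ss), v)]).filter (fun x => x.1.1 == c')
      = g.filter (fun x => x.1.1 == c') ++ (if c = c' then [((c, ss), v)] else []) := by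
    intro c'
    rw [List.filter_append]
    by_cases h : c = c' <;> simp [h]
  by_cases hc : c ∈ g.map (fun x => x.1.1)
  · have hccs : c ∈ PySem.List.dedup (g.map (fun x => x.1.1)) := (PySem.List.mem_dedup _ _).mpr hc
    have hcs'' : PySem.Set.add (PySem.List.dedup (g.map (fun x => x.1.1))) c
        = PySem.List.dedup (g.map (fun x => x.1.1)) := PySem.Set.add_of_mem hccs
    have hndid : ((PySem.List.dedup (g.map (fun x => x.1.1))).map id).Nodup := by
      simp only [List.map_id]; exact hcsnd
    have hgA := pvMk_getD_of_mem (PySem.List.dedup (g.map (fun x => x.1.1))) id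
      (fun c' => (g.filter (fun x => x.1.1 == c')).map (fun x => x.1.2)) c PySem.Set.empty hccs hndid
    have hgS := pvMk_getD_of_mem (PySem.List.dedup (g.map (fun x => x.1.1))) id
      (fun c' => pvMk (g.filter (fun x => x.1.1 == c')) (fun x => x.1.2) (fun x => x.2)) c
      PySem.Dict.empty hccs hndid
    simp only [id_eq] at hgA hgS
    have hcont : (pvMk (PySem.List.dedup (g.map (fun x => x.1.1))) id
        (fun c' => pvMk (g.filter (fun x => x.1.1 == c')) (fun x => x.1.2) (fun x => x.2))).contains c = true := by
      rw [pvMk_contains]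
      exact List.any_eq_true.mpr ⟨c, hccs, by simp⟩
    simp only [pvBAssemble, pvFinalG, hcs', hcs'', hcont, if_true, hgA, hgS]
    rw [PySem.Set.add_of_not_mem hssA]
    rw [pvMk_insert_of_mem _ id _ c _ ⟨c, hccs, rfl⟩]
    rw [pvMk_insert_fresh _ _ _ ss v (by
      intro a ha hk
      exact hssA (List.mem_map.mpr ⟨a, ha, hk⟩))]
    rw [pvMk_insert_of_mem _ id _ c _ ⟨c, hccs, rfl⟩]
    refine congrArg₂ Prod.mk ?_ ?_
    · apply pvMk_congr
      intro c' hc'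
      by_cases h : c' = c
      · subst h
        simp only [id_eq, hFA c', List.map_append]
        simp
      · simp only [id_eq, if_neg h, hFA c', if_neg (fun hh => h (Eq.symm hh)), List.append_nil]
    · apply pvMk_congr
      intro c' hc'
      by_cases h : c' = c
      · subst h
        simp only [id_eq, hFA c']
        unfold pvMk
        simp
      · simp only [id_eq, if_neg h, hFA c', if_neg (fun hh => h (Eq.symm hh)), List.append_nil]
  · have hccs : c ∉ PySem.List.dedup (g.map (fun x => x.1.1)) :=
      fun h => hc ((PySem.List.mem_dedup _ _).mp h)
    have hcs'' : PySem.Set.add (PySem.List.dedup (g.map (fun x => x.1.1))) c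
        = PySem.List.dedup (g.map (fun x => x.1.1)) ++ [c] := PySem.Set.add_of_not_mem hccs
    have hforall : ∀ c' ∈ PySem.List.dedup (g.map (fun x => x.1.1)), id c' ≠ c :=
      fun c' h1 h2 => hccs (by simpa [← h2] using h1)
    have hfilnil : g.filter (fun x => x.1.1 == c) = [] := pvFilterNil g c hc
    have hgA := pvMk_getD_of_forall_ne (PySem.List.dedup (g.map (fun x => x.1.1))) id
      (fun c' => (g.filter (fun x => x.1.1 == c')).map (fun x => x.1.2)) c PySem.Set.empty hforall
    have hcont : (pvMk (PySem.List.dedup (g.map (fun x => x.1.1))) id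
        (fun c' => pvMk (g.filter (fun x => x.1.1 == c')) (fun x => x.1.2) (fun x => x.2))).contains c = false := by
      rw [pvMk_contains]
      simp only [List.any_eq_false, beq_iff_eq]
      exact hforall
    simp only [pvBAssemble, pvFinalG, hcs', hcs'', hcont, Bool.false_eq_true, if_false, hgA]
    rw [PySem.Set.add_of_not_mem (by simp [PySem.Set.empty])]
    rw [pvMk_insert_fresh _ _ _ _ _ hforall]
    rw [PySem.Dict.getD_insert_self, PySem.Dict.insert_insert_self]
    rw [pvMk_insert_fresh _ _ _ _ _ hforall]
    refine congrArg₂ Prod.mk ?_ ?_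
    · apply PySem.Dict.ext
      show _ ++ _ = List.map _ _
      rw [List.map_append]
      refine congrArg₂ (· ++ ·) (List.map_congr_left ?_) ?_
      · intro c' hc'
        have h : c ≠ c' := fun hh => hccs (hh ▸ hc')
        simp only [id_eq, hFA c', if_neg h, List.append_nil]
      · simp only [List.map_cons, List.map_nil, id_eq, hFA c, hfilnil]
        simp [PySem.Set.empty]
    · apply PySem.Dict.ext
      show _ ++ _ = List.map _ _
      rw [List.map_append]
      refine congrArg₂ (· ++ ·) (List.map_congr_left ?_) ?_
      · intro c' hc'
        have h : c ≠ c' := fun hh => hccs (hh ▸ hc')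
        simp only [id_eq, hFA c', if_neg h, List.append_nil]
      · simp only [List.map_cons, List.map_nil, id_eq, hFA c, hfilnil]
        show [(c, PySem.Dict.insert _ ss v)] = [(c, pvMk _ _ _)]
        unfold pvMk
        simp [PySem.Dict.insert, PySem.Dict.contains, PySem.Dict.empty]

theorem pvAssemble_eq_finalG
    (g : List ((List String × List (Int × Int)) × List (List String)))
    (hnd : (g.map (fun e => e.1)).Nodup) :
    g.foldl pvBAssemble (PySem.Dict.empty, PySem.Dict.empty) = pvFinalG g := by
  induction g using List.reverseRecOn with
  | nil => rfl
  | append_singleton g e ih =>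
      rw [List.foldl_append, List.foldl_cons, List.foldl_nil]
      have h1 : (g.map (fun x => x.1)).Nodup ∧ e.1 ∉ g.map (fun x => x.1) := by
        rw [List.map_append, List.nodup_append] at hnd
        exact ⟨hnd.1, fun hm => hnd.2.2 e.1 hm e.1 (by simp) rfl⟩
      rw [ih h1.1, pvFinalG_fresh g e h1.1 h1.2]

theorem pvComm
    (g : List ((List String × List (Int × Int)) × List (List String)))
    (r : (List String × List (Int × Int)) × List String)
    (hnd : (g.map (fun e => e.1)).Nodup) :
    pvStepA (pvFinalG g) r = pvFinalG (pvStepF ⟨g⟩ r).items := by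
  obtain ⟨⟨c, ss⟩, v⟩ := r
  by_cases hmem : ((c, ss) : List String × List (Int × Int)) ∈ g.map (fun x => x.1)
  · obtain ⟨e₀, he₀g, he₀⟩ := List.mem_map.mp hmem
    have hgd : (⟨g⟩ : PySem.Dict (List String × List (Int × Int)) (List (List String))).getD (c, ss) [] = e₀.2 := by
      rw [pvMk_eta]
      have := pvMk_getD_of_mem g (fun a => a.1) (fun a => a.2) e₀ [] he₀g hnd
      simp only at this
      rwa [he₀] at this
    have hins : (pvStepF ⟨g⟩ ((c, ss), v)).items
        = g.map (fun a => (a.1, if a.1 = (c, ss) then e₀.2 ++ [v] else a.2)) := by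
      unfold pvStepF
      rw [hgd, pvMk_eta, pvMk_insert_of_mem _ _ _ (c, ss) _ ⟨e₀, he₀g, he₀⟩]
      rfl
    rw [hins]
    have hmap1 : (g.map (fun a => (a.1, if a.1 = (c, ss) then e₀.2 ++ [v] else a.2))).map
        (fun x => x.1.1) = g.map (fun x => x.1.1) := by
      rw [List.map_map]; rfl
    have hfil : ∀ c' : List String,
        (g.map (fun a => (a.1, if a.1 = (c, ss) then e₀.2 ++ [v] else a.2))).filter
          (fun x => x.1.1 == c')
        = (g.filter (fun x => x.1.1 == c')).map
            (fun a => (a.1, if a.1 = (c, ss) then e₀.2 ++ [v] else a.2)) := by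
      intro c'
      rw [List.filter_map]; rfl
    have hc : c ∈ g.map (fun x => x.1.1) := List.mem_map.mpr ⟨e₀, he₀g, by rw [he₀]⟩
    have hccs : c ∈ PySem.List.dedup (g.map (fun x => x.1.1)) := (PySem.List.mem_dedup _ _).mpr hc
    have hcsnd : (PySem.List.dedup (g.map (fun x => x.1.1))).Nodup := PySem.List.nodup_dedup _
    have hndid : ((PySem.List.dedup (g.map (fun x => x.1.1))).map id).Nodup := by
      simp only [List.map_id]; exact hcsnd
    have hgA := pvMk_getD_of_mem (PySem.List.dedup (g.map (fun x => x.1.1))) id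
      (fun c' => (g.filter (fun x => x.1.1 == c')).map (fun x => x.1.2)) c PySem.Set.empty hccs hndid
    have hgS := pvMk_getD_of_mem (PySem.List.dedup (g.map (fun x => x.1.1))) id
      (fun c' => pvMk (g.filter (fun x => x.1.1 == c')) (fun x => x.1.2) (fun x => x.2)) c
      PySem.Dict.empty hccs hndid
    simp only [id_eq] at hgA hgS
    have hcont : (pvMk (PySem.List.dedup (g.map (fun x => x.1.1))) id
        (fun c' => pvMk (g.filter (fun x => x.1.1 == c')) (fun x => x.1.2) (fun x => x.2))).contains c = true := by
      rw [pvMk_contains]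
      exact List.any_eq_true.mpr ⟨c, hccs, by simp⟩
    have he₀f : e₀ ∈ g.filter (fun x => x.1.1 == c) :=
      List.mem_filter.mpr ⟨he₀g, by simp [he₀]⟩
    have hssmem : ss ∈ (g.filter (fun x => x.1.1 == c)).map (fun x => x.1.2) :=
      List.mem_map.mpr ⟨e₀, he₀f, by rw [he₀]⟩
    have hinner := pvMk_getD_of_mem (g.filter (fun x => x.1.1 == c))
      (fun x => x.1.2) (fun x => x.2) e₀ [] he₀f (pvInnerNodup g c hnd)
    simp only at hinner
    rw [he₀] at hinner
    simp only [pvStepA, pvFinalG, hmap1, hfil, hcont, if_true, hgA, hgS, hinner]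
    rw [PySem.Set.add_of_mem hssmem]
    rw [pvMk_insert_of_mem _ id _ c _ ⟨c, hccs, rfl⟩]
    rw [pvMk_insert_of_mem _ (fun x => x.1.2) _ ss _ ⟨e₀, he₀f, by simp [he₀]⟩]
    rw [pvMk_insert_of_mem _ id _ c _ ⟨c, hccs, rfl⟩]
    refine congrArg₂ Prod.mk ?_ ?_
    · apply pvMk_congr
      intro c' hc'
      rw [List.map_map]
      simp only [id_eq]
      by_cases h : c' = c
      · subst h; rw [if_pos rfl]; rfl
      · rw [if_neg h]; rfl
    · apply pvMk_congr
      intro c' hc'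
      rw [pvMk_map]
      simp only [id_eq]
      by_cases h : c' = c
      · subst h
        rw [if_pos rfl]
        apply pvMk_congr
        intro a ha
        have hac : a.1.1 = c' := by simpa using (List.mem_filter.mp ha).2
        by_cases h2 : a.1.2 = ss
        · rw [if_pos h2, if_pos (Prod.ext hac h2)]
        · rw [if_neg h2, if_neg (fun hh => h2 (by rw [hh]))]
      · rw [if_neg h]
        apply pvMk_congr
        intro a ha
        have hac : a.1.1 = c' := by simpa using (List.mem_filter.mp ha).2
        rw [if_neg (fun hh => h (by rw [← hac, hh]))]
  · have hfr : ∀ a ∈ g, a.1 ≠ ((c, ss) : List String × List (Int × Int)) :=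
      fun a ha h => hmem (List.mem_map.mpr ⟨a, ha, h⟩)
    have hgd : (⟨g⟩ : PySem.Dict (List String × List (Int × Int)) (List (List String))).getD (c, ss) [] = [] := by
      rw [pvMk_eta]
      exact pvMk_getD_of_forall_ne _ _ _ _ _ hfr
    have hins : (pvStepF ⟨g⟩ ((c, ss), v)).items = g ++ [((c, ss), [v])] := by
      unfold pvStepF
      rw [hgd, pvMk_eta, pvMk_insert_fresh _ _ _ _ _ hfr]
      simp
    rw [hins, ← pvFinalG_fresh g ((c, ss), [v]) hnd hmem]
    have hinner : (((if (pvFinalG g).2.contains c then (pvFinalG g).2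
        else (pvFinalG g).2.insert c PySem.Dict.empty).getD c PySem.Dict.empty).getD ss []) = [] := by
      by_cases hc2 : c ∈ g.map (fun x => x.1.1)
      · have hccs : c ∈ PySem.List.dedup (g.map (fun x => x.1.1)) := (PySem.List.mem_dedup _ _).mpr hc2
        have hndid : ((PySem.List.dedup (g.map (fun x => x.1.1))).map id).Nodup := by
          simp only [List.map_id]; exact PySem.List.nodup_dedup (g.map (fun x => x.1.1))
        have hcont : (pvFinalG g).2.contains c = true := by
          show (pvMk _ id _).contains c = true
          rw [pvMk_contains]
          exact List.any_eq_true.mpr ⟨c, hccs, by simp⟩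
        have hgS := pvMk_getD_of_mem (PySem.List.dedup (g.map (fun x => x.1.1))) id
          (fun c' => pvMk (g.filter (fun x => x.1.1 == c')) (fun x => x.1.2) (fun x => x.2)) c
          PySem.Dict.empty hccs hndid
        simp only [id_eq] at hgS
        rw [hcont, if_pos rfl]
        show ((pvMk (PySem.List.dedup (g.map (fun x => x.1.1))) id _).getD c PySem.Dict.empty).getD ss []
          = []
        rw [hgS]
        apply pvMk_getD_of_forall_ne
        intro a ha h2
        have hac : a.1.1 = c := by simpa using (List.mem_filter.mp ha).2
        exact hfr a (List.mem_filter.mp ha).1 (Prod.ext hac h2)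
      · have hcont : (pvFinalG g).2.contains c = false := by
          show (pvMk _ id _).contains c = false
          rw [pvMk_contains]
          simp only [List.any_eq_false, beq_iff_eq, id_eq]
          exact fun c' h1 h2 => hc2 (h2 ▸ (PySem.List.mem_dedup _ _).mp h1)
        rw [hcont, if_neg (by decide), PySem.Dict.getD_insert_self]
        exact PySem.Dict.getD_empty _ _
    show pvStepA (pvFinalG g) ((c, ss), v) = pvBAssemble (pvFinalG g) ((c, ss), [v])
    simp only [pvStepA, pvBAssemble, hinner, List.nil_append]

theorem pvMain (rs : List ((List String × List (Int × Int)) × List String))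
    (flat : PySem.Dict (List String × List (Int × Int)) (List (List String)))
    (hnd : flat.keys.Nodup) :
    rs.foldl pvStepA (flat.items.foldl pvBAssemble (PySem.Dict.empty, PySem.Dict.empty)) =
      (rs.foldl pvStepF flat).items.foldl pvBAssemble (PySem.Dict.empty, PySem.Dict.empty) := by
  induction rs generalizing flat with
  | nil => rfl
  | cons r rs ih =>
      simp only [List.foldl_cons]
      have hnd' : (flat.items.map (fun e => e.1)).Nodup := hnd
      rw [pvAssemble_eq_finalG flat.items hnd', pvComm flat.items r hnd']
      have hflat : (⟨flat.items⟩ : PySem.Dict (List String × List (Int × Int)) (List (List String))) = flat := rfl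
      rw [hflat]
      have hnd2 : (pvStepF flat r).keys.Nodup := PySem.Dict.nodup_keys_insert _ _ _ hnd
      rw [← pvAssemble_eq_finalG (pvStepF flat r).items hnd2]
      exact ih (pvStepF flat r) hnd2

theorem pvAStep_eq
    (st : PySem.Dict (List String) (PySem.Set (List (Int × Int))) ×
          PySem.Dict (List String) (PySem.Dict (List (Int × Int)) (List (List String))))
    (p : List String × List (Int × Int)) (h : p.1.length = 4) :
    pvAStep st p = pvStepA st (pvRec p, pvVal p) := by
  obtain ⟨tx, ex⟩ := p
  rcases tx with _ | ⟨c, _ | ⟨s, _ | ⟨g, _ | ⟨t, _ | ⟨u, tx⟩⟩⟩⟩⟩ <;> simp_all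
  simp only [pvAStep, pvRec, pvVal, pvStepA, pvAIntrons_eq_zip]

theorem pvBFlatStep_eq
    (d : PySem.Dict (List String × List (Int × Int)) (List (List String)))
    (p : List String × List (Int × Int)) (h : p.1.length = 4) :
    pvBFlatStep d p = pvStepF d (pvRec p, pvVal p) := by
  obtain ⟨tx, ex⟩ := p
  rcases tx with _ | ⟨c, _ | ⟨s, _ | ⟨g, _ | ⟨t, _ | ⟨u, tx⟩⟩⟩⟩⟩ <;> simp_all
  simp only [pvBFlatStep, pvRec, pvVal, pvStepF]

-- ===== VERDICT (by name: the statement is the Claim_ definition above) =====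
theorem pvAFold (txs : List (List String × List (Int × Int))) (h4 : ∀ p ∈ txs, p.1.length = 4)
    (st : PySem.Dict (List String) (PySem.Set (List (Int × Int))) ×
          PySem.Dict (List String) (PySem.Dict (List (Int × Int)) (List (List String)))) :
    txs.foldl pvAStep st = (txs.map (fun p => (pvRec p, pvVal p))).foldl pvStepA st := by
  induction txs generalizing st with
  | nil => rfl
  | cons p t ih =>
      simp only [List.foldl_cons, List.map_cons]
      rw [pvAStep_eq st p (h4 p (by simp))]
      exact ih (fun q hq => h4 q (by simp [hq])) _

theorem pvBFold (txs : List (List String × List (Int × Int))) (h4 : ∀ p ∈ txs, p.1.length = 4)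
    (d : PySem.Dict (List String × List (Int × Int)) (List (List String))) :
    txs.foldl pvBFlatStep d = (txs.map (fun p => (pvRec p, pvVal p))).foldl pvStepF d := by
  induction txs generalizing d with
  | nil => rfl
  | cons p t ih =>
      simp only [List.foldl_cons, List.map_cons]
      rw [pvBFlatStep_eq d p (h4 p (by simp))]
      exact ih (fun q hq => h4 q (by simp [hq])) _

theorem construct_splice_structures_spec : Claim_equal_construct_splice_structures := by
  intro tx_dict _ hpre
  unfold Spec_construct_splice_structures construct_splice_structures construct_splice_structures_alt
  rw [pvAFold tx_dict hpre, pvBFold tx_dict hpre]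
  have hm := pvMain (tx_dict.map (fun p => (pvRec p, pvVal p))) PySem.Dict.empty
    (by simp [PySem.Dict.keys, PySem.Dict.empty])
  rw [show (PySem.Dict.empty : PySem.Dict (List String × List (Int × Int)) (List (List String))).items
        = [] from rfl, List.foldl_nil] at hm
  rw [hm]
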